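-- pv_equiv track=rewrite | github.com/Rubiga27/Special_sequences | special_subsequence_AG.py | AG
-- ===== SOURCE A (Python) =====
-- def AG (string):
--     result=0
--     count=0
--     for i in string:
--         if i=="A":
--            count+=1
--         if i=="G":
--            result+=count
--     return result
-- ===== SOURCE B (Python) =====
-- def AG(string):
--     total = 0
--     for j, ch in enumerate(string):
--         if ch == "G":
--             total += string[:j].count("A")
--     return total
-- ===== Notes on version B (the rewrite author's own statement) =====
-- stated objective: alternative
-- what changed: Replaces A's single-pass running A-counter with a per-G recount: for each 'G' at index j, B counts the 'A's in the prefix string[:j] and sums those counts.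
import Mathlib
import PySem

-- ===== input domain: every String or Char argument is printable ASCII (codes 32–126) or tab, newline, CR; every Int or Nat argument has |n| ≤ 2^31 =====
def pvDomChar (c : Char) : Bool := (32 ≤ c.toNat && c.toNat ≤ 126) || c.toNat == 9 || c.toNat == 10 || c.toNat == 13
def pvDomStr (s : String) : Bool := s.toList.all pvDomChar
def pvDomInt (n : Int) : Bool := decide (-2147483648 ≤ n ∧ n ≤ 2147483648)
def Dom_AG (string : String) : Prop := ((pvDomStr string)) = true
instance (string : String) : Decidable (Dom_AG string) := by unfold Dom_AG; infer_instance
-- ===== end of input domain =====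

-- B re-counts the 'A's of the prefix string[:j] at every 'G' instead of carrying A's running counter (objective: alternative).

-- ===== PORT A =====
-- state (result, count); per char: 'A' bumps count, 'G' adds count to result
def AG (string : String) : Int :=
  (string.toList.foldl
    (fun (st : Int × Int) i =>
      let st := if i = 'A' then (st.1, st.2 + 1) else st
      if i = 'G' then (st.1 + st.2, st.2) else st)
    (0, 0)).1

-- ===== PORT B =====
-- for j, ch in enumerate(string): if ch == "G": total += string[:j].count("A")
-- (string[:j] with j = enumerate index ≥ 0 is exactly `take j`; str.count of a single char is List.count)
def AG_alt (string : String) : Int :=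
  let l := string.toList
  (PySem.List.enumerate l 0).foldl
    (fun total p => if p.2 = 'G' then total + ((l.take p.1.toNat).count 'A' : Int) else total)
    0

-- ===== PRECONDITION & SPEC =====
def Spec_AG (string : String) (out : Int) : Prop := out = AG_alt string
instance (string : String) (out : Int) : Decidable (Spec_AG string out) := by unfold Spec_AG; infer_instance

-- ===== CLAIM (what is proved, stated in full; the proofs are below) =====
def Claim_equal_AG : Prop := ∀ (string : String), Dom_AG string → Spec_AG string (AG string)

-- ===== LEMMAS AND PROOFS =====

-- reference function: pairs contributed by the suffix, given c = number of 'A's already seen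
def pvF : List Char → Int → Int
  | [], _ => 0
  | x :: xs, c =>
    let c' := if x = 'A' then c + 1 else c
    (if x = 'G' then c' else 0) + pvF xs c'

theorem pvA_fold (xs : List Char) : ∀ (r c : Int),
    xs.foldl
      (fun (st : Int × Int) i =>
        let st := if i = 'A' then (st.1, st.2 + 1) else st
        if i = 'G' then (st.1 + st.2, st.2) else st)
      (r, c)
    = (r + pvF xs c, c + (xs.count 'A' : Int)) := by
  induction xs with
  | nil => intro r c; simp [pvF]
  | cons x xs ih =>
    intro r c
    simp only [List.foldl_cons, List.count_cons, pvF]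
    split_ifs with hA hG hG <;>
      simp_all <;> ring

theorem pvB_fold (l : List Char) : ∀ (suf pre : List Char), l = pre ++ suf → ∀ (a : Int),
    (PySem.List.enumerate suf (pre.length : Int)).foldl
      (fun total p => if p.2 = 'G' then total + ((l.take p.1.toNat).count 'A' : Int) else total)
      a
    = a + pvF suf (pre.count 'A') := by
  intro suf
  induction suf with
  | nil => intro pre _ a; simp [PySem.List.enumerate_nil, pvF]
  | cons x xs ih =>
    intro pre hl a
    rw [PySem.List.enumerate_cons, List.foldl_cons]
    have htake : l.take ((pre.length : Int)).toNat = pre := by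
      subst hl; simp
    have hpre : l = (pre ++ [x]) ++ xs := by simp [hl]
    have hlen : ((pre.length : Int) + 1) = (((pre ++ [x]).length : Nat) : Int) := by
      simp
    rw [hlen, ih (pre ++ [x]) hpre]
    have hcnt : ((pre ++ [x]).count 'A' : Int)
        = (pre.count 'A' : Int) + (if x = 'A' then 1 else 0) := by
      by_cases hA : x = 'A' <;> simp [List.count_append, hA]
    rw [htake, hcnt]
    simp only [pvF]
    (split_ifs with hG hA hA <;> simp_all); ring

-- ===== VERDICT (by name: the statement is the Claim_ definition above) =====
theorem AG_spec : Claim_equal_AG := by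
  intro s _
  unfold Spec_AG AG AG_alt
  rw [pvA_fold]
  have h := pvB_fold s.toList s.toList [] (by simp) 0
  simp only [List.length_nil, Nat.cast_zero, List.count_nil, Nat.cast_zero] at h
  simp [h]
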